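-- pv_equiv track=rewrite | github.com/jce77/EZFolderBackup | src/scripts/saving.py | sort_arguments
-- ===== SOURCE A (Python) =====
-- all_commands = ["-createpreset", "-b", "-deletepreset", "-h", "-help", "-hf", "-logfilemax", "-m", "-moveup",
--                 "-movedown", "-cleanup",
--                 "-nologging", "-runbackup", "-runpreset", "-skipfile", "-support", "-version", "-viewlog",
--                 "-viewpresets", "-skipfolder"]
--
-- def sort_arguments(arguments):
--     """ Sorts the arguments into a dictionary where the command is the key """
--     next_command = []
--     commands = []
--     for arg in arguments:
--         if arg in all_commands:
--             if len(next_command) > 0: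
--                 txt = ""
--                 for i in range(1, len(next_command)):
--                     if i == 1:
--                         txt = next_command[1]
--                     else:
--                         txt += " " + next_command[i]
--                 # commands[next_command[0]] = txt
--                 commands.append([next_command[0], txt])
--             # reached a new commands to set
--             next_command = [arg]
--         else:
--             next_command.append(arg)
--     if len(next_command) > 0:
--         txt = ""
--         for i in range(1, len(next_command)):
--             if i == 1:
--                 txt = next_command[1]
--             else:
--                 txt += " " + next_command[i]
--         # commands[next_command[0]] = txt
--         commands.append([next_command[0], txt])
--     return commands
-- ===== SOURCE B (Python) =====
-- all_commands = ["-createpreset", "-b", "-deletepreset", "-h", "-help", "-hf", "-logfilemax", "-m", "-moveup",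
--                 "-movedown", "-cleanup",
--                 "-nologging", "-runbackup", "-runpreset", "-skipfile", "-support", "-version", "-viewlog",
--                 "-viewpresets", "-skipfolder"]
--
-- def sort_arguments(arguments):
--     """ Sorts the arguments into a dictionary where the command is the key """
--     # B: instead of buffering words and flushing on each command, scan for the
--     # next chunk boundary and slice the chunk out directly, joining its tail.
--     commands = []
--     n = len(arguments)
--     i = 0
--     while i < n:
--         j = i + 1
--         while j < n and arguments[j] not in all_commands:
--             j += 1
--         commands.append([arguments[i], " ".join(arguments[i + 1:j])])
--         i = j
--     return commands
-- ===== Notes on version B (the rewrite author's own statement) =====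
-- stated objective: simpler
-- what changed: A buffers words in next_command and flushes on each command (rebuilding the joined text with a manual index loop); B scans for the next chunk boundary, slices the chunk out of the list directly and joins its tail with ' '.join.
import Mathlib
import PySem

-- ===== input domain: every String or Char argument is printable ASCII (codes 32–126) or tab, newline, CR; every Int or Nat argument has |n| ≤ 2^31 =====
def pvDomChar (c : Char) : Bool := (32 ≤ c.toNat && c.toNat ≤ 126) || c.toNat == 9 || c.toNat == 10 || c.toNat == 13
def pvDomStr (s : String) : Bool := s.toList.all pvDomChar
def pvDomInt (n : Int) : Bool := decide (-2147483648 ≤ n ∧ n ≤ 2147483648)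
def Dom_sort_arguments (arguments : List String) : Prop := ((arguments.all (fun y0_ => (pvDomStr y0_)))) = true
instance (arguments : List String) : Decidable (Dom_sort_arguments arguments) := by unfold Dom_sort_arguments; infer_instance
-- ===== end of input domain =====

-- B replaces A's buffer-and-flush single pass (manual index loop to build txt) by a
-- boundary scan that slices each chunk out and joins its tail; objective: simpler.

-- ===== PORT A =====
def all_commands : List String :=
  ["-createpreset", "-b", "-deletepreset", "-h", "-help", "-hf", "-logfilemax", "-m", "-moveup",
   "-movedown", "-cleanup",
   "-nologging", "-runbackup", "-runpreset", "-skipfile", "-support", "-version", "-viewlog",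
   "-viewpresets", "-skipfolder"]

-- A's inner loop: for i in range(1, len(nc)): if i == 1: txt = nc[1] else: txt += " " + nc[i]
def pyJoinLoop (nc : List String) : String :=
  (PySem.List.pyRange 1 (PySem.List.len nc) 1).foldl
    (fun txt i => if i = 1 then PySem.List.pyGetD nc 1 "" else txt ++ " " ++ PySem.List.pyGetD nc i "") ""

-- one iteration of A's 'for arg in arguments' loop over the state (next_command, commands)
def stepA (st : List String × List (List String)) (arg : String) : List String × List (List String) :=
  if all_commands.contains arg then
    if st.1.length > 0 then
      ([arg], st.2 ++ [[PySem.List.pyGetD st.1 0 "", pyJoinLoop st.1]])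
    else ([arg], st.2)
  else (st.1 ++ [arg], st.2)

-- the trailing 'if len(next_command) > 0: … append' after the loop
def finishA (st : List String × List (List String)) : List (List String) :=
  if st.1.length > 0 then st.2 ++ [[PySem.List.pyGetD st.1 0 "", pyJoinLoop st.1]] else st.2

def sort_arguments (arguments : List String) : List (List String) :=
  finishA (arguments.foldl stepA ([], []))

-- ===== PORT B =====
-- B's outer 'while i < n' is transcribed as recursion on the remaining suffix arguments[i:];
-- the inner j-scan plus the slice arguments[i+1:j] is exactly takeWhile/dropWhile of that suffix.
def sort_arguments_alt : List String → List (List String)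
  | [] => []
  | x :: xs =>
    [x, PySem.Str.join " " (xs.takeWhile (fun a => !(all_commands.contains a)))] ::
      sort_arguments_alt (xs.dropWhile (fun a => !(all_commands.contains a)))
  termination_by xs => xs.length
  decreasing_by
    simp only [List.length_cons]
    exact Nat.lt_succ_of_le (List.length_dropWhile_le _ _)

-- ===== PRECONDITION & SPEC =====
def Spec_sort_arguments (arguments : List String) (out : List (List String)) : Prop := out = sort_arguments_alt arguments
instance (arguments : List String) (out : List (List String)) : Decidable (Spec_sort_arguments arguments out) := by unfold Spec_sort_arguments; infer_instance

-- ===== CLAIM (what is proved, stated in full; the proofs are below) =====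
def Claim_equal_sort_arguments : Prop := ∀ (arguments : List String), Dom_sort_arguments arguments → Spec_sort_arguments arguments (sort_arguments arguments)

-- ===== LEMMAS AND PROOFS =====

-- Chars-level: appending one more part to a nonempty join appends "sep ++ part"
lemma chars_join_append_last (sep : List Char) (ps : List (List Char)) (q : List Char)
    (h : ps ≠ []) :
    PySem.Chars.join sep (ps ++ [q]) = PySem.Chars.join sep ps ++ sep ++ q := by
  induction ps with
  | nil => exact absurd rfl h
  | cons a ps ih =>
    cases ps with
    | nil => simp [PySem.Chars.join_cons_cons, PySem.Chars.join_singleton]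
    | cons b ps' =>
      have := ih (by simp)
      simp only [List.cons_append, PySem.Chars.join_cons_cons] at *
      simp [this]


lemma str_join_nil : PySem.Str.join " " [] = "" := by
  rw [← String.toList_inj]
  simp [PySem.Str.toList_join, PySem.Chars.join_nil]

lemma str_join_singleton (w : String) : PySem.Str.join " " [w] = w := by
  rw [← String.toList_inj]
  simp only [PySem.Str.toList_join, List.map_cons, List.map_nil, PySem.Chars.join_singleton]

lemma str_join_append_last (vs : List String) (w : String) (h : vs ≠ []) :
    PySem.Str.join " " (vs ++ [w]) = PySem.Str.join " " vs ++ " " ++ w := by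
  rw [← String.toList_inj]
  simp only [String.toList_append, PySem.Str.toList_join, List.map_append, List.map_cons,
    List.map_nil]
  rw [chars_join_append_last _ _ _ (by simpa using h)]

-- A's manual txt-building loop over nc = h :: ws computes " ".join(ws)
lemma pyJoinLoop_cons (ws : List String) (h : String) :
    pyJoinLoop (h :: ws) = PySem.Str.join " " ws := by
  induction ws using List.reverseRecOn with
  | nil =>
    simp [pyJoinLoop, PySem.List.pyRange_one_eq_nil, str_join_nil]
  | append_singleton vs w ih =>
    unfold pyJoinLoop
    have hlen : PySem.List.len (h :: (vs ++ [w])) = ((vs.length : Int) + 1) + 1 := by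
      simp [PySem.List.len]
    rw [hlen, PySem.List.pyRange_one_succ_right (by omega), List.foldl_append]
    have hcongr :
        (PySem.List.pyRange 1 ((vs.length : Int) + 1)).foldl
          (fun txt i => if i = 1 then PySem.List.pyGetD (h :: (vs ++ [w])) 1 ""
            else txt ++ " " ++ PySem.List.pyGetD (h :: (vs ++ [w])) i "") "" =
        (PySem.List.pyRange 1 ((vs.length : Int) + 1)).foldl
          (fun txt i => if i = 1 then PySem.List.pyGetD (h :: vs) 1 ""
            else txt ++ " " ++ PySem.List.pyGetD (h :: vs) i "") "" := by
      apply PySem.List.foldl_congr_mem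
      intro acc i hi
      rw [PySem.List.mem_pyRange_one] at hi
      have hget : PySem.List.pyGetD (h :: (vs ++ [w])) i "" = PySem.List.pyGetD (h :: vs) i "" := by
        have h1 : i < ((h :: vs).length : Int) := by simp; omega
        have h1n : i.toNat < (h :: vs).length := by simp at h1 ⊢; omega
        rw [PySem.List.pyGetD_eq_getElem _ _ (by omega) (by simp; omega),
            PySem.List.pyGetD_eq_getElem _ _ (by omega) h1]
        have heq : (h :: (vs ++ [w])) = (h :: vs) ++ [w] := by simp
        rw [List.getElem_of_eq heq]
        exact List.getElem_append_left h1n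
      by_cases h1 : i = 1
      · rw [h1] at hget
        simp only [h1, hget]
      · simp [h1, hget]
    rw [hcongr]
    have ihfold :
        (PySem.List.pyRange 1 ((vs.length : Int) + 1)).foldl
          (fun txt i => if i = 1 then PySem.List.pyGetD (h :: vs) 1 ""
            else txt ++ " " ++ PySem.List.pyGetD (h :: vs) i "") "" = PySem.Str.join " " vs := by
      have := ih
      unfold pyJoinLoop at this
      simpa [PySem.Str.len_eq, PySem.List.len] using this
    rw [ihfold]
    have hgetw : PySem.List.pyGetD (h :: (vs ++ [w])) ((vs.length : Int) + 1) "" = w := by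
      rw [PySem.List.pyGetD_eq_getElem _ _ (by omega) (by simp)]
      simp
    cases vs with
    | nil =>
      simp only [List.nil_append, List.foldl_cons, List.foldl_nil, List.length_nil,
        Nat.cast_zero, zero_add]
      rw [str_join_singleton]
      simpa using hgetw
    | cons v vs' =>
      simp only [List.foldl_cons, List.foldl_nil]
      rw [if_neg (by push_cast [List.length_cons]; omega), hgetw,
        str_join_append_last _ _ (by simp)]

-- the chunk-boundary predicate used by B
def notCmd (a : String) : Bool := !(all_commands.contains a)

lemma alt_cons (x : String) (xs : List String) :
    sort_arguments_alt (x :: xs) =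
      [x, PySem.Str.join " " (xs.takeWhile notCmd)] :: sort_arguments_alt (xs.dropWhile notCmd) := by
  rw [sort_arguments_alt]
  rfl

lemma alt_nil : sort_arguments_alt [] = [] := by
  rw [sort_arguments_alt]

-- main invariant: running A's loop from a nonempty buffer h :: ws produces the already
-- flushed groups acc, then the group for the current buffer extended by the next chunk,
-- then B's groups for the rest
lemma runA (xs : List String) : ∀ (h : String) (ws : List String) (acc : List (List String)),
    finishA (xs.foldl stepA (h :: ws, acc)) =
      acc ++ ([h, PySem.Str.join " " (ws ++ xs.takeWhile notCmd)] ::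
        sort_arguments_alt (xs.dropWhile notCmd)) := by
  induction xs with
  | nil =>
    intro h ws acc
    simp [finishA, pyJoinLoop_cons, alt_nil, PySem.List.pyGetD]
  | cons y ys ih =>
    intro h ws acc
    by_cases hy : y ∈ all_commands
    · have hstep : stepA (h :: ws, acc) y =
          ([y], acc ++ [[h, PySem.Str.join " " ws]]) := by
        simp [stepA, hy, PySem.List.pyGetD, pyJoinLoop_cons]
      rw [List.foldl_cons, hstep, ih]
      have htk : (y :: ys).takeWhile notCmd = [] := by
        simp [notCmd, hy]
      have hdw : (y :: ys).dropWhile notCmd = y :: ys := by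
        simp [notCmd, hy]
      rw [htk, hdw, alt_cons]
      simp
    · have hstep : stepA (h :: ws, acc) y = (h :: (ws ++ [y]), acc) := by
        simp [stepA, hy]
      rw [List.foldl_cons, hstep, ih]
      have htk : (y :: ys).takeWhile notCmd = y :: ys.takeWhile notCmd := by
        simp [notCmd, hy]
      have hdw : (y :: ys).dropWhile notCmd = ys.dropWhile notCmd := by
        simp [notCmd, hy]
      rw [htk, hdw]
      simp

-- ===== VERDICT (by name: the statement is the Claim_ definition above) =====
theorem sort_arguments_spec : Claim_equal_sort_arguments := by
  intro arguments _
  unfold Spec_sort_arguments sort_arguments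
  cases arguments with
  | nil => simp [finishA, alt_nil]
  | cons x xs =>
    have hstep : stepA ([], []) x = ([x], []) := by
      by_cases hx : x ∈ all_commands <;> simp [stepA, hx]
    rw [List.foldl_cons, hstep, runA, alt_cons]
    simp
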